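-- pv_equiv track=rewrite | github.com/gabrix00/AulSign | data/main_scripts/scripts/intermidiate_generation.py | get_most_freq
-- ===== SOURCE A (Python) =====
-- from collections import Counter
--
-- def get_most_freq(lista):
--     lista_cleaned = [item.lower().strip() for item in lista]
--     frequency_count = Counter(lista_cleaned)
--     top_two_words = frequency_count.most_common(2)
--
--     if len(top_two_words) >= 2:
--         return top_two_words[0][0] + '|' + top_two_words[1][0]
--     elif len(top_two_words) == 1:
--         return top_two_words[0][0]
--     else:
--         return ''
-- ===== SOURCE B (Python) =====
-- def get_most_freq(lista):
--     counts = {}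
--     for item in lista:
--         w = item.lower().strip()
--         counts[w] = counts.get(w, 0) + 1
--     best = None
--     second = None
--     for w, c in counts.items():
--         if best is None or c > best[1]:
--             second = best
--             best = (w, c)
--         elif second is None or c > second[1]:
--             second = (w, c)
--     if best is None:
--         return ''
--     if second is None:
--         return best[0]
--     return best[0] + '|' + second[0]
-- ===== Notes on version B (the rewrite author's own statement) =====
-- stated objective: alternative
-- what changed: Replaces Counter + most_common(2) (a stable sort of the distinct items) by a dict built with an explicit loop and one linear pass over its items maintaining the two running winners with strictly-greater updates, which reproduces most_common's earliest-insertion tie-breaking without sorting.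
import Mathlib
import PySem

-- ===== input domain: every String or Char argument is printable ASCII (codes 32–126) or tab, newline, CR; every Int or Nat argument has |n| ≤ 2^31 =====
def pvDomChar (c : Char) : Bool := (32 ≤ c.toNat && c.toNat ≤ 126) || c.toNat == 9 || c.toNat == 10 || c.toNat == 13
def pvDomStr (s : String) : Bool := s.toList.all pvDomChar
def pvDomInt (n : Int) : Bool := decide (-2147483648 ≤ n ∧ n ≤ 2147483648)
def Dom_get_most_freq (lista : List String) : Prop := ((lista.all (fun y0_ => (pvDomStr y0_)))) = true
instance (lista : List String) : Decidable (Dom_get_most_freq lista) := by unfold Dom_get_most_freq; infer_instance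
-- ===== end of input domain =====

-- B replaces Counter.most_common(2) by a dict built with an explicit loop plus a single
-- linear pass keeping two running winners (strict-> updates preserve first-insertion ties);
-- objective: alternative decomposition (no sort of the items).


-- ===== PORT A =====
def get_most_freq (lista : List String) : String :=
  let lista_cleaned := lista.map (fun item => PySem.Str.strip (PySem.Str.lower item))
  let frequency_count := PySem.Dict.counter lista_cleaned
  -- Counter.most_common(2) = sorted(items, key=count, reverse=True)[:2] (stable)
  let top_two_words := (PySem.List.sorted frequency_count.items (fun p => p.2) true).take 2
  if top_two_words.length ≥ 2 then
    (top_two_words[0]?.getD ("", 0)).1 ++ "|" ++ (top_two_words[1]?.getD ("", 0)).1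
  else if top_two_words.length = 1 then
    (top_two_words[0]?.getD ("", 0)).1
  else
    ""

-- ===== PORT B =====
-- one step of Source B's two-winner scan over the dict items
def pvAltStep (st : Option (String × Int) × Option (String × Int)) (p : String × Int) :
    Option (String × Int) × Option (String × Int) :=
  match st.1 with
  | none => (some p, none)
  | some b =>
    if b.2 < p.2 then (some p, st.1)
    else
      match st.2 with
      | none => (st.1, some p)
      | some s => if s.2 < p.2 then (st.1, some p) else st

def get_most_freq_alt (lista : List String) : String :=
  let counts := lista.foldl (fun d item =>
      let w := PySem.Str.strip (PySem.Str.lower item)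
      d.insert w (d.getD w 0 + 1)) PySem.Dict.empty
  let st := counts.items.foldl pvAltStep (none, none)
  match st.1, st.2 with
  | none, _ => ""
  | some b, none => b.1
  | some b, some s => b.1 ++ "|" ++ s.1

-- ===== PRECONDITION & SPEC =====
def Spec_get_most_freq (lista : List String) (out : String) : Prop := out = get_most_freq_alt lista
instance (lista : List String) (out : String) : Decidable (Spec_get_most_freq lista out) := by unfold Spec_get_most_freq; infer_instance

-- ===== CLAIM (what is proved, stated in full; the proofs are below) =====
def Claim_equal_get_most_freq : Prop := ∀ (lista : List String), Dom_get_most_freq lista → Spec_get_most_freq lista (get_most_freq lista)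

-- ===== LEMMAS AND PROOFS =====

-- the first two elements of a list, as B's scan state
def pvFirst2 {α : Type} (l : List α) : Option α × Option α := (l[0]?, l[1]?)

lemma pvFirst2_insertBy (x : String × Int) (acc : List (String × Int)) :
    pvFirst2 (PySem.List.insertBy (fun a b => decide (b.2 < a.2)) x acc)
      = pvAltStep (pvFirst2 acc) x := by
  match acc with
  | [] => simp [PySem.List.insertBy, pvFirst2, pvAltStep]
  | a :: t =>
    by_cases h : a.2 < x.2
    · simp [PySem.List.insertBy, pvFirst2, pvAltStep, h]
    · match t with
      | [] => simp [PySem.List.insertBy, pvFirst2, pvAltStep, h]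
      | b :: t' =>
        by_cases h2 : b.2 < x.2 <;>
          simp [PySem.List.insertBy, pvFirst2, pvAltStep, h, h2]

lemma pvFoldl_altStep (L : List (String × Int)) (acc : List (String × Int)) :
    L.foldl pvAltStep (pvFirst2 acc)
      = pvFirst2 (L.foldl
          (fun acc x => PySem.List.insertBy (fun a b => decide (b.2 < a.2)) x acc) acc) := by
  induction L generalizing acc with
  | nil => rfl
  | cons x L ih =>
    simp only [List.foldl_cons, ← pvFirst2_insertBy]
    exact ih _

-- ===== VERDICT (by name: the statement is the Claim_ definition above) =====
theorem get_most_freq_spec : Claim_equal_get_most_freq := by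
  intro lista _
  unfold Spec_get_most_freq get_most_freq get_most_freq_alt
  simp only [List.foldl_map (g := fun d x => PySem.Dict.insert d x (d.getD x 0 + 1))] at *
  rw [show (lista.foldl (fun d item =>
        let w := PySem.Str.strip (PySem.Str.lower item)
        d.insert w (d.getD w 0 + 1)) PySem.Dict.empty)
      = PySem.Dict.counter (lista.map (fun item => PySem.Str.strip (PySem.Str.lower item)))
      from by
        rw [← PySem.Dict.foldl_insert_getD_add_one_eq_counter, List.foldl_map]]
  set L := (PySem.Dict.counter (lista.map (fun item => PySem.Str.strip (PySem.Str.lower item)))).items with hL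
  have hfold : L.foldl pvAltStep (none, none)
      = pvFirst2 (PySem.List.sorted L (fun p => p.2) true) := by
    rw [PySem.List.sorted_rev_eq_foldl_insertBy]
    exact pvFoldl_altStep L []
  simp only [hfold]
  rcases hs : PySem.List.sorted L (fun p => p.2) true with _ | ⟨a, _ | ⟨b, t⟩⟩ <;>
    simp [pvFirst2]
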